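-- pv_equiv track=rewrite | github.com/sejaldua/synergy-scouting-app | sequence_dump.py | parse_player_only_play
-- ===== SOURCE A (Python) =====
-- def parse_player_only_play(play_list, tallies):
--     for event in play_list:
--         if event == 'Miss 2 Pts' or event == 'Miss 3 Pts':
--             tallies['attempts'] += 1
--         if event == 'Miss 3 Pts':
--             tallies['3PT attempts'] += 1
--         if event == 'Make 2 Pts' or event == 'Make 3 Pts':
--             tallies['makes'] += 1
--             tallies['attempts'] += 1
--             if event == 'Make 2 Pts':
--                 tallies['points'] += 2
--             elif event == 'Make 3 Pts':
--                 tallies['points'] += 3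
--                 tallies['3PT makes'] += 1
--                 tallies['3PT attempts'] += 1
--         if event == 'Guarded':
--             tallies['guarded'] += 1
--         if event == 'Open':
--             tallies['open'] += 1
--         if event == 'Turnover':
--             tallies['turnovers'] += 1
--         if event == 'Free Throw':
--             tallies['FT attempts'] += 1
--         if event == 'Made':
--             tallies['points'] += 1
--             tallies['FT makes'] += 1
--     tallies['possessions'] += 1
--     return tallies
-- ===== SOURCE B (Python) =====
-- def parse_player_only_play(play_list, tallies):
--     # One counting pass, then closed-form arithmetic per statistic.
--     # Mutates `tallies` in place (like the original) and returns it.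
--     c = {}
--     for e in play_list:
--         c[e] = c.get(e, 0) + 1
--     n = c.get
--     miss2, miss3 = n('Miss 2 Pts', 0), n('Miss 3 Pts', 0)
--     make2, make3 = n('Make 2 Pts', 0), n('Make 3 Pts', 0)
--     made = n('Made', 0)
--     adds = {
--         'attempts': miss2 + miss3 + make2 + make3,
--         'makes': make2 + make3,
--         'points': 2 * make2 + 3 * make3 + made,
--         '3PT attempts': miss3 + make3,
--         '3PT makes': make3,
--         'guarded': n('Guarded', 0),
--         'open': n('Open', 0),
--         'turnovers': n('Turnover', 0),
--         'FT attempts': n('Free Throw', 0),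
--         'FT makes': made,
--     }
--     for k, v in adds.items():
--         if v:
--             tallies[k] += v
--     tallies['possessions'] += 1
--     return tallies
-- ===== Notes on version B (the rewrite author's own statement) =====
-- stated objective: simpler
-- what changed: Replaces the per-event 11-branch cascade with one counting pass over play_list followed by closed-form arithmetic (attempts = miss2+miss3+make2+make3, points = 2*make2+3*make3+made, ...) applied once per statistic key.
import Mathlib
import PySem

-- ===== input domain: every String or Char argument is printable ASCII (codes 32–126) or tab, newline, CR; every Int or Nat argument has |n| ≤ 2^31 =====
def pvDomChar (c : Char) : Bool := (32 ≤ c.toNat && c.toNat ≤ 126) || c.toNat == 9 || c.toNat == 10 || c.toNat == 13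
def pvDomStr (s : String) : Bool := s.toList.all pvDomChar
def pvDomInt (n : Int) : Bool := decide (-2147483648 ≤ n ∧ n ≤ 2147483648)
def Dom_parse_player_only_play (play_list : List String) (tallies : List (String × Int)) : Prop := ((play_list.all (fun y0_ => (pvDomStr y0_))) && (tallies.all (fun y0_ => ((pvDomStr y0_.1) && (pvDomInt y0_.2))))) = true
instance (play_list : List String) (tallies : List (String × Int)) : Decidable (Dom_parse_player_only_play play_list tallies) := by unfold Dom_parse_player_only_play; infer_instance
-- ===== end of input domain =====

-- B replaces A's per-event branch cascade by one counting pass plus closed-form arithmetic per statistic (objective: simpler).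
-- Both versions mutate `tallies` in place in Python; the equivalence proved here is about the returned value (which is the same object).

-- `bump t k v` is Python's `tallies[k] += v` on the assoc list behind the dict: it adds v to the
-- FIRST entry whose key is k, and is a no-op when k is absent (Python raises KeyError there —
-- those inputs are excluded by Pre_parse_player_only_play). Shared transliteration helper of both ports.
def bump : List (String × Int) → String → Int → List (String × Int)
  | [], _, _ => []
  | (k', x) :: rest, k, v => if k' = k then (k', x + v) :: rest else (k', x) :: bump rest k v

-- ===== PORT A =====
-- loop body of A: the branch cascade, branches in source order
def stepA (t0 : List (String × Int)) (event : String) : List (String × Int) :=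
  let t1 := if event = "Miss 2 Pts" ∨ event = "Miss 3 Pts" then bump t0 "attempts" 1 else t0
  let t2 := if event = "Miss 3 Pts" then bump t1 "3PT attempts" 1 else t1
  let t3 := if event = "Make 2 Pts" ∨ event = "Make 3 Pts" then
      let u1 := bump t2 "makes" 1
      let u2 := bump u1 "attempts" 1
      if event = "Make 2 Pts" then bump u2 "points" 2
      else if event = "Make 3 Pts" then bump (bump (bump u2 "points" 3) "3PT makes" 1) "3PT attempts" 1
      else u2
    else t2
  let t4 := if event = "Guarded" then bump t3 "guarded" 1 else t3
  let t5 := if event = "Open" then bump t4 "open" 1 else t4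
  let t6 := if event = "Turnover" then bump t5 "turnovers" 1 else t5
  let t7 := if event = "Free Throw" then bump t6 "FT attempts" 1 else t6
  if event = "Made" then bump (bump t7 "points" 1) "FT makes" 1 else t7

def parse_player_only_play (play_list : List String) (tallies : List (String × Int)) : List (String × Int) :=
  bump (play_list.foldl stepA tallies) "possessions" 1

-- ===== PORT B =====
def parse_player_only_play_alt (play_list : List String) (tallies : List (String × Int)) : List (String × Int) :=
  let c := PySem.Dict.counter play_list
  let miss2 := c.getD "Miss 2 Pts" 0
  let miss3 := c.getD "Miss 3 Pts" 0
  let make2 := c.getD "Make 2 Pts" 0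
  let make3 := c.getD "Make 3 Pts" 0
  let made := c.getD "Made" 0
  let adds : List (String × Int) :=
    [("attempts", miss2 + miss3 + make2 + make3),
     ("makes", make2 + make3),
     ("points", 2 * make2 + 3 * make3 + made),
     ("3PT attempts", miss3 + make3),
     ("3PT makes", make3),
     ("guarded", c.getD "Guarded" 0),
     ("open", c.getD "Open" 0),
     ("turnovers", c.getD "Turnover" 0),
     ("FT attempts", c.getD "Free Throw" 0),
     ("FT makes", made)]
  let t := adds.foldl (fun t kv => if kv.2 ≠ 0 then bump t kv.1 kv.2 else t) tallies
  bump t "possessions" 1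

-- ===== PRECONDITION & SPEC =====
-- Pre_ excludes exactly the inputs on which the Python A raises KeyError: 'possessions' must be a
-- key of tallies, and each statistic key must be present whenever play_list contains an event that
-- updates it. (B raises KeyError on the same inputs.)
def Pre_parse_player_only_play (play_list : List String) (tallies : List (String × Int)) : Prop :=
  (let ks := tallies.map Prod.fst
   ks.contains "possessions" &&
   (!(play_list.contains "Miss 2 Pts" || play_list.contains "Miss 3 Pts" ||
      play_list.contains "Make 2 Pts" || play_list.contains "Make 3 Pts") || ks.contains "attempts") &&
   (!(play_list.contains "Make 2 Pts" || play_list.contains "Make 3 Pts") || ks.contains "makes") &&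
   (!(play_list.contains "Make 2 Pts" || play_list.contains "Make 3 Pts" ||
      play_list.contains "Made") || ks.contains "points") &&
   (!(play_list.contains "Miss 3 Pts" || play_list.contains "Make 3 Pts") || ks.contains "3PT attempts") &&
   (!(play_list.contains "Make 3 Pts") || ks.contains "3PT makes") &&
   (!(play_list.contains "Guarded") || ks.contains "guarded") &&
   (!(play_list.contains "Open") || ks.contains "open") &&
   (!(play_list.contains "Turnover") || ks.contains "turnovers") &&
   (!(play_list.contains "Free Throw") || ks.contains "FT attempts") &&
   (!(play_list.contains "Made") || ks.contains "FT makes")) = true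
instance (play_list : List String) (tallies : List (String × Int)) : Decidable (Pre_parse_player_only_play play_list tallies) := by unfold Pre_parse_player_only_play; infer_instance

def pvWitness_parse_player_only_play : List String × (List (String × Int)) :=
  (["Make 3 Pts", "Guarded", "Made"],
   [("attempts", 0), ("makes", 0), ("points", 0), ("3PT attempts", 0), ("3PT makes", 0),
    ("guarded", 0), ("FT makes", 0), ("possessions", 0)])

def Spec_parse_player_only_play (play_list : List String) (tallies : List (String × Int)) (out : List (String × Int)) : Prop := out = parse_player_only_play_alt play_list tallies
instance (play_list : List String) (tallies : List (String × Int)) (out : List (String × Int)) : Decidable (Spec_parse_player_only_play play_list tallies out) := by unfold Spec_parse_player_only_play; infer_instance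

-- ===== CLAIM (what is proved, stated in full; the proofs are below) =====
def Claim_equal_parse_player_only_play : Prop := ∀ (play_list : List String) (tallies : List (String × Int)), Dom_parse_player_only_play play_list tallies → Pre_parse_player_only_play play_list tallies → Spec_parse_player_only_play play_list tallies (parse_player_only_play play_list tallies)

-- ===== LEMMAS AND PROOFS =====

lemma bump_zero (t : List (String × Int)) (k : String) : bump t k 0 = t := by
  induction t with
  | nil => rfl
  | cons h rest ih =>
    obtain ⟨k', x⟩ := h
    by_cases hk : k' = k <;> simp [bump, hk, ih]

lemma bump_bump_same (t : List (String × Int)) (k : String) (a b : Int) :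
    bump (bump t k a) k b = bump t k (a + b) := by
  induction t with
  | nil => rfl
  | cons h rest ih =>
    obtain ⟨k', x⟩ := h
    by_cases hk : k' = k
    · simp [bump, hk, add_assoc]
    · simp [bump, hk, ih]

lemma bump_comm (k k' : String) (h : k ≠ k') (t : List (String × Int)) (a b : Int) :
    bump (bump t k a) k' b = bump (bump t k' b) k a := by
  induction t with
  | nil => rfl
  | cons hd rest ih =>
    obtain ⟨k0, x⟩ := hd
    by_cases h1 : k0 = k <;> by_cases h2 : k0 = k' <;>
      simp_all [bump]

lemma guard_bump (t : List (String × Int)) (k : String) (v : Int) :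
    (if v ≠ 0 then bump t k v else t) = bump t k v := by
  by_cases h : v = 0 <;> simp [h, bump_zero]

def C (t : List (String × Int)) (a m p q r g o u f n : Int) : List (String × Int) :=
  bump (bump (bump (bump (bump (bump (bump (bump (bump (bump t "attempts" a) "makes" m) "points" p) "3PT attempts" q) "3PT makes" r) "guarded" g) "open" o) "turnovers" u) "FT attempts" f) "FT makes" n

lemma Cb_a (t : List (String × Int)) (x a m p q r g o u f n : Int) :
    C (bump t "attempts" x) a m p q r g o u f n = C t (x + a) m p q r g o u f n := by
  simp only [C]
  rw [bump_bump_same]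

lemma Cb_m (t : List (String × Int)) (x a m p q r g o u f n : Int) :
    C (bump t "makes" x) a m p q r g o u f n = C t a (x + m) p q r g o u f n := by
  simp only [C]
  rw [bump_comm "makes" "attempts" (by decide)]
  rw [bump_bump_same]

lemma Cb_p (t : List (String × Int)) (x a m p q r g o u f n : Int) :
    C (bump t "points" x) a m p q r g o u f n = C t a m (x + p) q r g o u f n := by
  simp only [C]
  rw [bump_comm "points" "attempts" (by decide)]
  rw [bump_comm "points" "makes" (by decide)]
  rw [bump_bump_same]

lemma Cb_q (t : List (String × Int)) (x a m p q r g o u f n : Int) :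
    C (bump t "3PT attempts" x) a m p q r g o u f n = C t a m p (x + q) r g o u f n := by
  simp only [C]
  rw [bump_comm "3PT attempts" "attempts" (by decide)]
  rw [bump_comm "3PT attempts" "makes" (by decide)]
  rw [bump_comm "3PT attempts" "points" (by decide)]
  rw [bump_bump_same]

lemma Cb_r (t : List (String × Int)) (x a m p q r g o u f n : Int) :
    C (bump t "3PT makes" x) a m p q r g o u f n = C t a m p q (x + r) g o u f n := by
  simp only [C]
  rw [bump_comm "3PT makes" "attempts" (by decide)]
  rw [bump_comm "3PT makes" "makes" (by decide)]
  rw [bump_comm "3PT makes" "points" (by decide)]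
  rw [bump_comm "3PT makes" "3PT attempts" (by decide)]
  rw [bump_bump_same]

lemma Cb_g (t : List (String × Int)) (x a m p q r g o u f n : Int) :
    C (bump t "guarded" x) a m p q r g o u f n = C t a m p q r (x + g) o u f n := by
  simp only [C]
  rw [bump_comm "guarded" "attempts" (by decide)]
  rw [bump_comm "guarded" "makes" (by decide)]
  rw [bump_comm "guarded" "points" (by decide)]
  rw [bump_comm "guarded" "3PT attempts" (by decide)]
  rw [bump_comm "guarded" "3PT makes" (by decide)]
  rw [bump_bump_same]

lemma Cb_o (t : List (String × Int)) (x a m p q r g o u f n : Int) :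
    C (bump t "open" x) a m p q r g o u f n = C t a m p q r g (x + o) u f n := by
  simp only [C]
  rw [bump_comm "open" "attempts" (by decide)]
  rw [bump_comm "open" "makes" (by decide)]
  rw [bump_comm "open" "points" (by decide)]
  rw [bump_comm "open" "3PT attempts" (by decide)]
  rw [bump_comm "open" "3PT makes" (by decide)]
  rw [bump_comm "open" "guarded" (by decide)]
  rw [bump_bump_same]

lemma Cb_u (t : List (String × Int)) (x a m p q r g o u f n : Int) :
    C (bump t "turnovers" x) a m p q r g o u f n = C t a m p q r g o (x + u) f n := by
  simp only [C]
  rw [bump_comm "turnovers" "attempts" (by decide)]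
  rw [bump_comm "turnovers" "makes" (by decide)]
  rw [bump_comm "turnovers" "points" (by decide)]
  rw [bump_comm "turnovers" "3PT attempts" (by decide)]
  rw [bump_comm "turnovers" "3PT makes" (by decide)]
  rw [bump_comm "turnovers" "guarded" (by decide)]
  rw [bump_comm "turnovers" "open" (by decide)]
  rw [bump_bump_same]

lemma Cb_f (t : List (String × Int)) (x a m p q r g o u f n : Int) :
    C (bump t "FT attempts" x) a m p q r g o u f n = C t a m p q r g o u (x + f) n := by
  simp only [C]
  rw [bump_comm "FT attempts" "attempts" (by decide)]
  rw [bump_comm "FT attempts" "makes" (by decide)]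
  rw [bump_comm "FT attempts" "points" (by decide)]
  rw [bump_comm "FT attempts" "3PT attempts" (by decide)]
  rw [bump_comm "FT attempts" "3PT makes" (by decide)]
  rw [bump_comm "FT attempts" "guarded" (by decide)]
  rw [bump_comm "FT attempts" "open" (by decide)]
  rw [bump_comm "FT attempts" "turnovers" (by decide)]
  rw [bump_bump_same]

lemma Cb_n (t : List (String × Int)) (x a m p q r g o u f n : Int) :
    C (bump t "FT makes" x) a m p q r g o u f n = C t a m p q r g o u f (x + n) := by
  simp only [C]
  rw [bump_comm "FT makes" "attempts" (by decide)]
  rw [bump_comm "FT makes" "makes" (by decide)]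
  rw [bump_comm "FT makes" "points" (by decide)]
  rw [bump_comm "FT makes" "3PT attempts" (by decide)]
  rw [bump_comm "FT makes" "3PT makes" (by decide)]
  rw [bump_comm "FT makes" "guarded" (by decide)]
  rw [bump_comm "FT makes" "open" (by decide)]
  rw [bump_comm "FT makes" "turnovers" (by decide)]
  rw [bump_comm "FT makes" "FT attempts" (by decide)]
  rw [bump_bump_same]


-- integer count of a string in a list
def cnt (pl : List String) (s : String) : Int := (pl.count s : Int)

lemma cnt_nil (s : String) : cnt [] s = 0 := rfl

lemma cnt_cons (e : String) (pl : List String) (s : String) :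
    cnt (e :: pl) s = cnt pl s + (if e = s then 1 else 0) := by
  simp [cnt, List.count_cons]

lemma C_zero (t : List (String × Int)) : C t 0 0 0 0 0 0 0 0 0 0 = t := by
  simp [C, bump_zero]

lemma loopA_eq (pl : List String) : ∀ (t : List (String × Int)),
    pl.foldl stepA t =
      C t (cnt pl "Miss 2 Pts" + cnt pl "Miss 3 Pts" + cnt pl "Make 2 Pts" + cnt pl "Make 3 Pts")
        (cnt pl "Make 2 Pts" + cnt pl "Make 3 Pts")
        (2 * cnt pl "Make 2 Pts" + 3 * cnt pl "Make 3 Pts" + cnt pl "Made")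
        (cnt pl "Miss 3 Pts" + cnt pl "Make 3 Pts")
        (cnt pl "Make 3 Pts") (cnt pl "Guarded") (cnt pl "Open") (cnt pl "Turnover")
        (cnt pl "Free Throw") (cnt pl "Made") := by
  induction pl with
  | nil => intro t; simp [cnt_nil, C_zero]
  | cons e es ih =>
    intro t
    rw [List.foldl_cons, ih]
    simp only [cnt_cons]
    by_cases h1 : e = "Miss 2 Pts"
    · simp [stepA, h1, Cb_a] ; ring_nf
    by_cases h2 : e = "Miss 3 Pts"
    · simp [stepA, h2, Cb_a, Cb_q] ; ring_nf
    by_cases h3 : e = "Make 2 Pts"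
    · simp [stepA, h3, Cb_a, Cb_m, Cb_p] ; ring_nf
    by_cases h4 : e = "Make 3 Pts"
    · simp [stepA, h4, Cb_a, Cb_m, Cb_p, Cb_q, Cb_r] ; ring_nf
    by_cases h5 : e = "Guarded"
    · simp [stepA, h5, Cb_g] ; ring_nf
    by_cases h6 : e = "Open"
    · simp [stepA, h6, Cb_o] ; ring_nf
    by_cases h7 : e = "Turnover"
    · simp [stepA, h7, Cb_u] ; ring_nf
    by_cases h8 : e = "Free Throw"
    · simp [stepA, h8, Cb_f] ; ring_nf
    by_cases h9 : e = "Made"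
    · simp [stepA, h9, Cb_p, Cb_n] ; ring_nf
    · simp [stepA, h1, h2, h3, h4, h5, h6, h7, h8, h9]

-- ===== VERDICT (by name: the statement is the Claim_ definition above) =====
theorem parse_player_only_play_spec : Claim_equal_parse_player_only_play := by
  intro pl t _ _
  unfold Spec_parse_player_only_play parse_player_only_play parse_player_only_play_alt
  rw [loopA_eq]
  simp only [List.foldl, PySem.Dict.getD_counter, guard_bump]
  rfl
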